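-- pv_equiv track=rewrite | github.com/stumpinator/hashana | src/hashana/adapted.py | flatten_address
-- ===== SOURCE A (Python) =====
-- from itertools import groupby
--
-- def flatten_address(hex_pieces: list[str]) -> str:
--     sqshd = list()
--     longest = 1
--     for k,g in groupby(hex_pieces, key=lambda x: x=='0'):
--         if k:
--             zl = list(g)
--             sqshd.append(zl)
--             if len(zl) > longest:
--                 longest = len(zl)
--         else:
--             sqshd.extend(list(g))
--
--     if longest == 8:
--         return "::0"
--
--     i = 0
--     mx = len(sqshd)
--     while i < mx:
--         if isinstance(sqshd[i], list):
--             g = sqshd.pop(i)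
--             mx -= 1
--             if len(g) == 1:
--                 sqshd.insert(i, g[0])
--                 i += 1
--                 mx += 1
--             elif len(g) == longest:
--                 sqshd.insert(i, '')
--                 longest = 0
--                 i += 1
--                 mx += 1
--             else:
--                 for h in g:
--                     sqshd.insert(i, h)
--                     i += 1
--                     mx += 1
--         i += 1
--     if sqshd[0] == '':
--         sqshd.insert(0, '')
--     elif sqshd[-1] == '':
--         sqshd.append('')
--     return ':'.join(sqshd)
-- ===== SOURCE B (Python) =====
-- def flatten_address(hex_pieces: list[str]) -> str:
--     # one linear pass: first maximal run of '0' pieces, then rebuild by slicing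
--     best_start = best_len = 0
--     cur_start = cur_len = 0
--     for i, p in enumerate(hex_pieces):
--         if p == '0':
--             if cur_len == 0:
--                 cur_start = i
--             cur_len += 1
--             if cur_len > best_len:
--                 best_start, best_len = cur_start, cur_len
--         else:
--             cur_len = 0
--     if best_len == 8:
--         return '::0'
--     if best_len >= 2:
--         result = hex_pieces[:best_start] + [''] + hex_pieces[best_start + best_len:]
--     else:
--         result = list(hex_pieces)
--     if result[0] == '':
--         result.insert(0, '')
--     elif result[-1] == '':
--         result.append('')
--     return ':'.join(result)
-- ===== Notes on version B (the rewrite author's own statement) =====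
-- stated objective: simpler
-- what changed: Replaces A's itertools.groupby pass plus a mutating while-loop that pops and re-inserts list objects inside a mixed str/list buffer with one indexed linear scan that records the first longest run of '0' pieces and a slice-based rebuild (pieces[:start] + [''] + pieces[start+len:]).
import Mathlib
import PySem

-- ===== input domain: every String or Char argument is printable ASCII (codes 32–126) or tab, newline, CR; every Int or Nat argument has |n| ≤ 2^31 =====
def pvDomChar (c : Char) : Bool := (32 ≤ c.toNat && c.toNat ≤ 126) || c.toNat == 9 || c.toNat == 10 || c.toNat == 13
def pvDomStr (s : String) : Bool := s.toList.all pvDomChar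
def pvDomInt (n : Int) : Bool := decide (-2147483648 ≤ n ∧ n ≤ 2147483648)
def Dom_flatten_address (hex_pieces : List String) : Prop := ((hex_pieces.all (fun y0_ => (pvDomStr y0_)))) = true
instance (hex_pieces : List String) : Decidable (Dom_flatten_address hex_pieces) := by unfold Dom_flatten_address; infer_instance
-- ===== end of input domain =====

-- B replaces A's groupby + mutating while-loop (pop/insert on a mixed list) by one
-- indexed scan finding the first longest '0'-run plus a slice-based rebuild: simpler.

-- ===== PORT A =====
-- itertools.groupby(hex_pieces, key=lambda x: x=='0') as eager consecutive grouping
def pvGroupBy0 : List String → List (Bool × List String)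
  | [] => []
  | x :: xs =>
    match pvGroupBy0 xs with
    | [] => [((x == "0"), [x])]
    | (k, g) :: rest =>
      if (x == "0") = k then (k, x :: g) :: rest
      else ((x == "0"), [x]) :: (k, g) :: rest

-- the body of A's first for-loop: sqshd grows, longest is updated on zero groups
def pvStepA (st : List (Sum String (List String)) × Int) (kg : Bool × List String) :
    List (Sum String (List String)) × Int :=
  if kg.1 then
    (st.1 ++ [Sum.inr kg.2], if (kg.2.length : Int) > st.2 then (kg.2.length : Int) else st.2)
  else (st.1 ++ kg.2.map Sum.inl, st.2)

-- A's while loop: indices only move forward, so it is this structural recursion over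
-- the same list with the same mutable 'longest' state (set to 0 after the collapse)
def pvPass2 : List (Sum String (List String)) → Int → List String
  | [], _ => []
  | Sum.inl s :: rest, L => s :: pvPass2 rest L
  | Sum.inr g :: rest, L =>
    if g.length = 1 then g ++ pvPass2 rest L
    else if (g.length : Int) = L then "" :: pvPass2 rest 0
    else g ++ pvPass2 rest L

-- the leading/trailing '' fixup shared verbatim by both Python versions;
-- Python raises IndexError on [] (excluded by Pre_), here [] returns []
def pvFixup (xs : List String) : List String :=
  match xs with
  | [] => []
  | a :: _ =>
    if a = "" then "" :: xs
    else if xs.getLast? = some "" then xs ++ [""]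
    else xs

def flatten_address (hex_pieces : List String) : String :=
  let p := (pvGroupBy0 hex_pieces).foldl pvStepA ([], 1)
  if p.2 = 8 then "::0"
  else PySem.Str.join ":" (pvFixup (pvPass2 p.1 p.2))

-- ===== PORT B =====
-- B's loop body: state (cur_start, cur_len, best_start, best_len)
def pvScanStep (st : Int × Int × Int × Int) (ip : Int × String) : Int × Int × Int × Int :=
  if ip.2 = "0" then
    let curStart := if st.2.1 = 0 then ip.1 else st.1
    let curLen := st.2.1 + 1
    if st.2.2.2 < curLen then (curStart, curLen, curStart, curLen)
    else (curStart, curLen, st.2.2.1, st.2.2.2)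
  else (st.1, 0, st.2.2.1, st.2.2.2)

def flatten_address_alt (hex_pieces : List String) : String :=
  let st := (PySem.List.enumerate hex_pieces 0).foldl pvScanStep (0, 0, 0, 0)
  let bestStart := st.2.2.1
  let bestLen := st.2.2.2
  if bestLen = 8 then "::0"
  else
    let result :=
      if 2 ≤ bestLen then
        PySem.List.slice hex_pieces none (some bestStart) ++ [""] ++
          PySem.List.slice hex_pieces (some (bestStart + bestLen)) none
      else hex_pieces
    PySem.Str.join ":" (pvFixup result)

-- ===== PRECONDITION & SPEC =====
-- Pre_ excludes only the empty list, on which Python A raises IndexError (sqshd[0])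
def Pre_flatten_address (hex_pieces : List String) : Prop := hex_pieces ≠ []
instance (hex_pieces : List String) : Decidable (Pre_flatten_address hex_pieces) := by
  unfold Pre_flatten_address; infer_instance

def pvWitness_flatten_address : List String := (["1", "0", "0", "2"])

def Spec_flatten_address (hex_pieces : List String) (out : String) : Prop := out = flatten_address_alt hex_pieces
instance (hex_pieces : List String) (out : String) : Decidable (Spec_flatten_address hex_pieces out) := by unfold Spec_flatten_address; infer_instance

-- ===== CLAIM (what is proved, stated in full; the proofs are below) =====
def Claim_equal_flatten_address : Prop := ∀ (hex_pieces : List String), Dom_flatten_address hex_pieces → Pre_flatten_address hex_pieces → Spec_flatten_address hex_pieces (flatten_address hex_pieces)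

-- ===== LEMMAS AND PROOFS =====

-- proof-only helpers -------------------------------------------------------

def pvFlat (gs : List (Bool × List String)) : List String := gs.flatMap (·.2)

def pvBuildSq (gs : List (Bool × List String)) : List (Sum String (List String)) :=
  gs.flatMap (fun kg => if kg.1 then [Sum.inr kg.2] else kg.2.map Sum.inl)

def pvMaxL : List (Bool × List String) → Int → Int
  | [], L => L
  | kg :: r, L =>
      pvMaxL r (if kg.1 ∧ L < (kg.2.length : Int) then (kg.2.length : Int) else L)

def pvBestLen : List (Bool × List String) → Nat
  | [] => 0
  | kg :: r => if kg.1 then max kg.2.length (pvBestLen r) else pvBestLen r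

def pvRender : List (Bool × List String) → Int → List String
  | [], _ => []
  | kg :: r, L =>
    if kg.1 then
      (if kg.2.length = 1 then kg.2 ++ pvRender r L
       else if (kg.2.length : Int) = L then "" :: pvRender r 0
       else kg.2 ++ pvRender r L)
    else kg.2 ++ pvRender r L

def pvBestAux : List (Bool × List String) → Int → Int → Int → Int × Int
  | [], _, bs, bl => (bs, bl)
  | kg :: r, p, bs, bl =>
    if kg.1 ∧ bl < (kg.2.length : Int) then pvBestAux r (p + kg.2.length) p (kg.2.length : Int)
    else pvBestAux r (p + kg.2.length) bs bl

def pvFpos (L : Nat) : List (Bool × List String) → Nat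
  | [] => 0
  | kg :: r => if kg.1 ∧ kg.2.length = L then 0 else kg.2.length + pvFpos L r

def pvWF (gs : List (Bool × List String)) : Prop :=
  ∀ kg ∈ gs, kg.2 ≠ [] ∧ ∀ x ∈ kg.2, (x == "0") = kg.1

-- facts about pvGroupBy0 ---------------------------------------------------

theorem pvGrp_flat (xs : List String) : pvFlat (pvGroupBy0 xs) = xs := by
  induction xs with
  | nil => rfl
  | cons x xs ih =>
    rcases h : pvGroupBy0 xs with _ | ⟨⟨k, g⟩, rest⟩ <;> rw [h] at ih <;>
      simp only [pvGroupBy0, h]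
    · simp only [pvFlat, List.flatMap_nil] at ih
      simp [pvFlat, ← ih]
    · by_cases hk : (x == "0") = k <;>
        simp [pvFlat, hk, List.flatMap_cons] at ih ⊢ <;> simp [← ih]

theorem pvGrp_wf (xs : List String) : pvWF (pvGroupBy0 xs) := by
  induction xs with
  | nil => intro kg h; simp [pvGroupBy0] at h
  | cons x xs ih =>
    rcases h : pvGroupBy0 xs with _ | ⟨⟨k, g⟩, rest⟩ <;> rw [h] at ih <;>
      simp only [pvGroupBy0, h]
    · intro kg hkg
      simp at hkg
      subst hkg; exact ⟨by simp, by simp⟩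
    · have hhead := ih (k, g) (by simp)
      by_cases hk : (x == "0") = k
      · rw [if_pos hk]
        intro kg hkg
        rcases List.mem_cons.mp hkg with h1 | h2
        · subst h1
          refine ⟨by simp, ?_⟩
          intro y hy
          rcases List.mem_cons.mp hy with rfl | hy2
          · exact hk
          · exact hhead.2 y hy2
        · exact ih kg (List.mem_cons_of_mem _ h2)
      · rw [if_neg hk]
        intro kg hkg
        rcases List.mem_cons.mp hkg with h1 | h2
        · subst h1; exact ⟨by simp, by simp⟩
        · exact ih kg h2

theorem pvGrp_chain (xs : List String) :
    List.IsChain (fun a b : Bool × List String => a.1 ≠ b.1) (pvGroupBy0 xs) := by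
  induction xs with
  | nil => simp [pvGroupBy0]
  | cons x xs ih =>
    rcases h : pvGroupBy0 xs with _ | ⟨⟨k, g⟩, rest⟩ <;> rw [h] at ih <;>
      simp only [pvGroupBy0, h]
    · simp
    · by_cases hk : (x == "0") = k
      · rw [if_pos hk]
        cases rest with
        | nil => simp
        | cons b l =>
          rw [List.isChain_cons_cons] at ih ⊢
          exact ⟨ih.1, ih.2⟩
      · rw [if_neg hk]
        rw [List.isChain_cons_cons]
        exact ⟨hk, ih⟩

-- A-side characterisation --------------------------------------------------

theorem pvPass1_acc (gs : List (Bool × List String)) (sq : List (Sum String (List String))) (L : Int) :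
    gs.foldl pvStepA (sq, L) = (sq ++ pvBuildSq gs, pvMaxL gs L) := by
  induction gs generalizing sq L with
  | nil => simp [pvBuildSq, pvMaxL]
  | cons kg r ih =>
    cases hk : kg.1
    · simp only [List.foldl_cons, pvStepA, hk, Bool.false_eq_true, if_false]
      rw [ih]
      simp [pvBuildSq, pvMaxL, hk, List.flatMap_cons]
    · simp only [List.foldl_cons, pvStepA, hk, if_true]
      rw [ih]
      simp only [pvBuildSq, pvMaxL, hk, List.flatMap_cons, true_and, gt_iff_lt,
        List.append_assoc, List.singleton_append, if_true]

theorem pvMaxL_eq (gs : List (Bool × List String)) (L : Int) (hL : 0 ≤ L) :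
    pvMaxL gs L = max L (pvBestLen gs : Int) := by
  induction gs generalizing L with
  | nil => simp [pvMaxL, pvBestLen]; omega
  | cons kg r ih =>
    cases hk : kg.1
    · simp only [pvMaxL, pvBestLen, hk, Bool.false_eq_true, false_and, if_false]
      rw [ih L hL]
    · simp only [pvMaxL, pvBestLen, hk, true_and, if_true]
      by_cases hlt : L < (kg.2.length : Int)
      · rw [if_pos hlt, ih _ (by omega)]
        push_cast
        omega
      · rw [if_neg hlt, ih L hL]
        push_cast
        omega

theorem pvPass2_inl (ss : List String) (t : List (Sum String (List String))) (L : Int) :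
    pvPass2 (ss.map Sum.inl ++ t) L = ss ++ pvPass2 t L := by
  induction ss with
  | nil => simp
  | cons s ss ih => simp [pvPass2, ih]

theorem pvBuildSq_cons (kg : Bool × List String) (r : List (Bool × List String)) :
    pvBuildSq (kg :: r) =
      (if kg.1 = true then [Sum.inr kg.2] else kg.2.map Sum.inl) ++ pvBuildSq r := by
  simp [pvBuildSq]

theorem pvPass2_build (gs : List (Bool × List String)) (L : Int) :
    pvPass2 (pvBuildSq gs) L = pvRender gs L := by
  induction gs generalizing L with
  | nil => rfl
  | cons kg r ih =>
    rw [pvBuildSq_cons]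
    cases hk : kg.1
    · rw [if_neg (by simp), pvPass2_inl, ih]
      simp [pvRender, hk]
    · rw [if_pos rfl, List.singleton_append]
      simp only [pvPass2, pvRender, hk, if_true]
      split_ifs <;> rw [ih]

-- B-side scan characterisation ---------------------------------------------

theorem pvScan_zeros (g : List String) :
    (∀ x ∈ g, x = "0") → ∀ (p cs j bs bl : Int), 0 ≤ j → j ≤ bl →
    (PySem.List.enumerate g p).foldl pvScanStep (cs, j, bs, bl) =
      ((if j = 0 ∧ g ≠ [] then p else cs), j + g.length,
       (if bl < j + g.length then (if j = 0 ∧ g ≠ [] then p else cs) else bs),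
       max bl (j + g.length)) := by
  induction g with
  | nil =>
    intro _ p cs j bs bl h0 hjb
    simp only [PySem.List.enumerate_nil, List.foldl_nil, List.length_nil, Nat.cast_zero,
      add_zero, ne_eq, not_true_eq_false, and_false, if_false]
    rw [if_neg (by omega), max_eq_left hjb]
  | cons x g ih =>
    intro hz p cs j bs bl h0 hjb
    have hx : x = "0" := hz x (by simp)
    rw [PySem.List.enumerate_cons, List.foldl_cons]
    have hstep : pvScanStep (cs, j, bs, bl) (p, x) =
        ((if j = 0 then p else cs), j + 1,
         (if bl < j + 1 then (if j = 0 then p else cs) else bs), max bl (j + 1)) := by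
      simp only [pvScanStep, hx]
      by_cases hb : bl < j + 1 <;> simp [hb] <;> omega
    rw [hstep,
      ih (fun y hy => hz y (List.mem_cons_of_mem _ hy)) (p + 1) _ (j + 1) _ _ (by omega)
        (le_max_right _ _)]
    have hc1 : ¬(j + 1 = 0 ∧ g ≠ []) := fun h => by omega
    rw [if_neg hc1]
    simp only [Prod.mk.injEq, List.length_cons, ne_eq, List.cons_ne_nil, not_false_eq_true,
      and_true]
    push_cast
    refine ⟨?_, by omega, ?_, by omega⟩ <;>
      first
        | trivial
        | (split_ifs <;> first | rfl | omega)

theorem pvScan_nonzeros (g : List String) :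
    (∀ x ∈ g, x ≠ "0") → ∀ (p cs j bs bl : Int),
    (PySem.List.enumerate g p).foldl pvScanStep (cs, j, bs, bl) =
      (cs, (if g = [] then j else 0), bs, bl) := by
  induction g with
  | nil => intro _ p cs j bs bl; simp [PySem.List.enumerate_nil]
  | cons x g ih =>
    intro hz p cs j bs bl
    have hx : x ≠ "0" := hz x (by simp)
    rw [PySem.List.enumerate_cons, List.foldl_cons]
    have hstep : pvScanStep (cs, j, bs, bl) (p, x) = (cs, 0, bs, bl) := by
      simp only [pvScanStep, if_neg hx]
    rw [hstep, ih (fun y hy => hz y (List.mem_cons_of_mem _ hy))]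
    simp

theorem pvScan_groups (gs : List (Bool × List String)) :
    pvWF gs →
    List.IsChain (fun a b : Bool × List String => a.1 ≠ b.1) gs →
    ∀ (p cs cl bs bl : Int), 0 ≤ cl → cl ≤ bl →
    (∀ k g r, gs = (k, g) :: r → k = true → cl = 0) →
    ((PySem.List.enumerate (pvFlat gs) p).foldl pvScanStep (cs, cl, bs, bl)).2.2 =
      pvBestAux gs p bs bl := by
  induction gs with
  | nil =>
    intro _ _ p cs cl bs bl _ _ _
    simp [pvFlat, pvBestAux, PySem.List.enumerate_nil]
  | cons kg r ih =>
    intro hwf hch p cs cl bs bl h0 hcb hhd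
    obtain ⟨k, g⟩ := kg
    have hg := hwf (k, g) (by simp)
    have hwfr : pvWF r := fun kg hk => hwf kg (List.mem_cons_of_mem _ hk)
    have hchr : List.IsChain (fun a b : Bool × List String => a.1 ≠ b.1) r := by
      cases r with
      | nil => simp
      | cons b l => exact (List.isChain_cons_cons.mp hch).2
    rw [show pvFlat ((k, g) :: r) = g ++ pvFlat r from by simp [pvFlat],
      PySem.List.enumerate_append, List.foldl_append]
    cases k
    · have hnz : ∀ x ∈ g, x ≠ "0" := by
        intro x hx h
        have := hg.2 x hx
        rw [h] at this
        simp at this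
      rw [pvScan_nonzeros g hnz, if_neg hg.1,
        ih hwfr hchr (p + g.length) cs 0 bs bl le_rfl (by omega)
          (fun k' g' r' hr hk' => rfl)]
      simp [pvBestAux]
    · have hz : ∀ x ∈ g, x = "0" := by
        intro x hx
        have := hg.2 x hx
        simpa using this
      have hcl0 : cl = 0 := hhd true g r rfl rfl
      subst hcl0
      rw [pvScan_zeros g hz p cs 0 bs bl le_rfl (by omega)]
      have hhd' : ∀ k' g' r', r = (k', g') :: r' → k' = true → (0 + (g.length : Int)) = 0 := by
        intro k' g' r' hr hk'
        exfalso
        rw [hr] at hch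
        have := (List.isChain_cons_cons.mp hch).1
        simp [hk'] at this
      rw [if_pos ⟨rfl, hg.1⟩]
      have ihr := ih hwfr hchr (p + g.length) p (0 + (g.length : Int))
      simp only [pvBestAux]
      split_ifs with h1 h2 h2
      · have hm : max bl (0 + (g.length : Int)) = 0 + (g.length : Int) := by omega
        rw [hm, ihr p (0 + (g.length : Int)) (by omega) le_rfl hhd']
        congr 1
        omega
      · exact absurd ⟨trivial, by omega⟩ h2
      · exact absurd (by omega : bl < 0 + (g.length : Int)) h1
      · have hm : max bl (0 + (g.length : Int)) = bl := by omega
        rw [hm]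
        exact ihr bs bl (by omega) (by omega) hhd'

-- bestAux / bestLen / fpos -------------------------------------------------

theorem pvBestAux_snd (gs : List (Bool × List String)) :
    ∀ (p bs bl : Int), 0 ≤ bl → (pvBestAux gs p bs bl).2 = max bl (pvBestLen gs : Int) := by
  induction gs with
  | nil => intro p bs bl h; simp [pvBestAux, pvBestLen]; omega
  | cons a r ih =>
    intro p bs bl h
    simp only [pvBestAux, pvBestLen]
    by_cases hc : a.1 = true ∧ bl < (a.2.length : Int)
    · rw [if_pos hc, ih _ _ _ (Int.natCast_nonneg _), if_pos hc.1]
      push_cast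
      omega
    · rw [if_neg hc, ih _ _ _ h]
      by_cases hk : a.1 = true
      · have : ¬bl < (a.2.length : Int) := fun hlt => hc ⟨hk, hlt⟩
        rw [if_pos hk]
        push_cast
        omega
      · rw [if_neg hk]

theorem pvBestLen_le (gs : List (Bool × List String)) :
    ∀ kg ∈ gs, kg.1 = true → kg.2.length ≤ pvBestLen gs := by
  induction gs with
  | nil => simp
  | cons a r ih =>
    intro kg hm hk
    rcases List.mem_cons.mp hm with rfl | hm'
    · simp only [pvBestLen, if_pos hk]
      exact le_max_left _ _
    · have := ih kg hm' hk
      simp only [pvBestLen]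
      by_cases ha : a.1 = true
      · rw [if_pos ha]; omega
      · rw [if_neg ha]; omega

theorem pvBestLen_exists (gs : List (Bool × List String)) :
    0 < pvBestLen gs → ∃ kg ∈ gs, kg.1 = true ∧ kg.2.length = pvBestLen gs := by
  induction gs with
  | nil => simp [pvBestLen]
  | cons a r ih =>
    intro h
    simp only [pvBestLen] at h ⊢
    by_cases ha : a.1 = true
    · rw [if_pos ha] at h ⊢
      by_cases hge : pvBestLen r ≤ a.2.length
      · exact ⟨a, by simp, ha, by omega⟩
      · obtain ⟨kg, hm, hk, hlen⟩ := ih (by omega)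
        exact ⟨kg, by simp [hm], hk, by omega⟩
    · rw [if_neg ha] at h ⊢
      obtain ⟨kg, hm, hk, hlen⟩ := ih h
      exact ⟨kg, by simp [hm], hk, hlen⟩

theorem pvBestAux_stable (gs : List (Bool × List String)) (bl : Int) :
    (∀ kg ∈ gs, kg.1 = true → (kg.2.length : Int) ≤ bl) → ∀ (p bs : Int),
    pvBestAux gs p bs bl = (bs, bl) := by
  induction gs with
  | nil => intro _ p bs; rfl
  | cons a r ih =>
    intro h p bs
    simp only [pvBestAux]
    rw [if_neg (fun hc => absurd (h a (by simp) hc.1) (not_le.mpr hc.2))]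
    exact ih (fun kg hm hk => h kg (List.mem_cons_of_mem _ hm) hk) _ _

theorem pvBestAux_fpos (L : Nat) (gs : List (Bool × List String)) :
    (∀ kg ∈ gs, kg.1 = true → kg.2.length ≤ L) →
    (∃ kg ∈ gs, kg.1 = true ∧ kg.2.length = L) →
    ∀ (p bs bl : Int), bl < L →
    pvBestAux gs p bs bl = (p + (pvFpos L gs : Int), (L : Int)) := by
  induction gs with
  | nil => rintro _ ⟨kg, hm, _⟩; simp at hm
  | cons a r ih =>
    intro hle hex p bs bl hbl
    have hler : ∀ kg ∈ r, kg.1 = true → kg.2.length ≤ L :=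
      fun kg hm hk => hle kg (List.mem_cons_of_mem _ hm) hk
    simp only [pvBestAux, pvFpos]
    by_cases hc : a.1 = true ∧ a.2.length = L
    · rw [if_pos ⟨hc.1, by rw [hc.2]; exact hbl⟩, if_pos hc,
        pvBestAux_stable r ((a.2.length : Nat) : Int)
          (fun kg hm hk => by exact_mod_cast hc.2 ▸ hler kg hm hk) _ _]
      simp [hc.2]
    · have hex' : ∃ kg ∈ r, kg.1 = true ∧ kg.2.length = L := by
        obtain ⟨kg, hm, hk, hlen⟩ := hex
        rcases List.mem_cons.mp hm with rfl | hm'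
        · exact absurd ⟨hk, hlen⟩ hc
        · exact ⟨kg, hm', hk, hlen⟩
      rw [if_neg hc]
      by_cases hc2 : a.1 = true ∧ bl < (a.2.length : Int)
      · have hlt : a.2.length < L :=
          lt_of_le_of_ne (hle a (by simp) hc2.1) (fun h => hc ⟨hc2.1, h⟩)
        rw [if_pos hc2, ih hler hex' (p + a.2.length) p a.2.length (by exact_mod_cast hlt)]
        simp only [Prod.mk.injEq, and_true]
        push_cast
        omega
      · rw [if_neg hc2, ih hler hex' (p + a.2.length) bs bl hbl]
        simp only [Prod.mk.injEq, and_true]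
        push_cast
        omega

-- render characterisations -------------------------------------------------

theorem pvRender_zero (gs : List (Bool × List String)) :
    pvWF gs → pvRender gs 0 = pvFlat gs := by
  induction gs with
  | nil => intro _; rfl
  | cons a r ih =>
    intro hwf
    have ha := hwf a (by simp)
    have ihr := ih (fun kg hm => hwf kg (List.mem_cons_of_mem _ hm))
    simp only [pvRender]
    by_cases hk : a.1 = true
    · rw [if_pos hk]
      by_cases h1 : a.2.length = 1
      · rw [if_pos h1, ihr]; simp [pvFlat]
      · rw [if_neg h1,
          if_neg (fun h => ha.1 (List.length_eq_zero_iff.mp (by exact_mod_cast h))), ihr]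
        simp [pvFlat]
    · rw [if_neg hk, ihr]; simp [pvFlat]

theorem pvRender_one (gs : List (Bool × List String)) :
    pvWF gs → pvBestLen gs ≤ 1 → pvRender gs 1 = pvFlat gs := by
  induction gs with
  | nil => intro _ _; rfl
  | cons a r ih =>
    intro hwf h
    have ha := hwf a (by simp)
    have hr1 : pvBestLen r ≤ 1 := by
      simp only [pvBestLen] at h
      by_cases hk : a.1 = true
      · rw [if_pos hk] at h; omega
      · rwa [if_neg hk] at h
    have ihr := ih (fun kg hm => hwf kg (List.mem_cons_of_mem _ hm)) hr1
    simp only [pvRender]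
    by_cases hk : a.1 = true
    · have hlen := pvBestLen_le (a :: r) a (by simp) hk
      have hne : a.2.length ≠ 0 := fun h0 => ha.1 (List.length_eq_zero_iff.mp h0)
      have h1 : a.2.length = 1 := by
        simp only [pvBestLen, if_pos hk] at hlen h
        omega
      rw [if_pos hk, if_pos h1, ihr]
      simp [pvFlat]
    · rw [if_neg hk, ihr]; simp [pvFlat]

theorem pvRender_collapse (L : Nat) (hL : 2 ≤ L) :
    ∀ gs : List (Bool × List String), pvWF gs →
    (∀ kg ∈ gs, kg.1 = true → kg.2.length ≤ L) →
    (∃ kg ∈ gs, kg.1 = true ∧ kg.2.length = L) →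
    pvRender gs (L : Int) =
      (pvFlat gs).take (pvFpos L gs) ++ "" :: (pvFlat gs).drop (pvFpos L gs + L) := by
  intro gs
  induction gs with
  | nil => rintro _ _ ⟨kg, hm, _⟩; simp at hm
  | cons a r ih =>
    intro hwf hle hex
    have ha := hwf a (by simp)
    have hwfr : pvWF r := fun kg hm => hwf kg (List.mem_cons_of_mem _ hm)
    have hler : ∀ kg ∈ r, kg.1 = true → kg.2.length ≤ L :=
      fun kg hm hk => hle kg (List.mem_cons_of_mem _ hm) hk
    have hflat : pvFlat (a :: r) = a.2 ++ pvFlat r := by simp [pvFlat]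
    simp only [pvRender]
    by_cases hc : a.1 = true ∧ a.2.length = L
    · rw [if_pos hc.1, if_neg (by omega : ¬a.2.length = 1),
        if_pos (by exact_mod_cast congrArg (Nat.cast : Nat → Int) hc.2),
        pvRender_zero r hwfr,
        show pvFpos L (a :: r) = 0 from by simp [pvFpos, hc], hflat]
      simp only [List.take_zero, zero_add, List.nil_append]
      rw [← hc.2, List.drop_left]
    · have hex' : ∃ kg ∈ r, kg.1 = true ∧ kg.2.length = L := by
        obtain ⟨kg, hm, hk, hlen⟩ := hex
        rcases List.mem_cons.mp hm with rfl | hm'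
        · exact absurd ⟨hk, hlen⟩ hc
        · exact ⟨kg, hm', hk, hlen⟩
      have hfp : pvFpos L (a :: r) = a.2.length + pvFpos L r := by
        simp [pvFpos, hc]
      have hstep : ∀ z : List String,
          (if a.1 = true then
            (if a.2.length = 1 then a.2 ++ z
             else if ((a.2.length : Nat) : Int) = (L : Int) then "" :: pvRender r 0
             else a.2 ++ z)
           else a.2 ++ z) = a.2 ++ z := by
        intro z
        by_cases hk : a.1 = true
        · rw [if_pos hk]
          by_cases h1 : a.2.length = 1
          · rw [if_pos h1]
          · rw [if_neg h1, if_neg (fun h => hc ⟨hk, by exact_mod_cast h⟩)]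
        · rw [if_neg hk]
      rw [hstep, ih hwfr hler hex', hfp, hflat]
      rw [List.take_append, List.drop_append,
        List.take_of_length_le (l := a.2) (by omega),
        List.drop_eq_nil_of_le (as := a.2) (by omega)]
      have e1 : a.2.length + pvFpos L r - a.2.length = pvFpos L r := by omega
      have e2 : a.2.length + pvFpos L r + L - a.2.length = pvFpos L r + L := by omega
      rw [e1, e2]
      simp

-- ===== VERDICT (by name: the statement is the Claim_ definition above) =====
theorem flatten_address_spec : Claim_equal_flatten_address := by
  intro xs _ _
  show flatten_address xs = flatten_address_alt xs
  have hwf := pvGrp_wf xs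
  have hch := pvGrp_chain xs
  have hflat : pvFlat (pvGroupBy0 xs) = xs := pvGrp_flat xs
  have hfold : (pvGroupBy0 xs).foldl pvStepA ([], 1) =
      (pvBuildSq (pvGroupBy0 xs), max 1 (pvBestLen (pvGroupBy0 xs) : Int)) := by
    rw [pvPass1_acc, pvMaxL_eq _ _ (by omega)]
    simp
  have hscan : ((PySem.List.enumerate xs 0).foldl pvScanStep (0, 0, 0, 0)).2.2 =
      pvBestAux (pvGroupBy0 xs) 0 0 0 := by
    conv_lhs => rw [← hflat]
    exact pvScan_groups (pvGroupBy0 xs) hwf hch 0 0 0 0 0 le_rfl le_rfl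
      (fun _ _ _ _ _ => rfl)
  have hsnd : (pvBestAux (pvGroupBy0 xs) 0 0 0).2 = (pvBestLen (pvGroupBy0 xs) : Int) := by
    rw [pvBestAux_snd (pvGroupBy0 xs) 0 0 0 le_rfl]
    omega
  have hA : flatten_address xs =
      (if ((pvGroupBy0 xs).foldl pvStepA ([], 1)).2 = 8 then "::0"
       else PySem.Str.join ":" (pvFixup (pvPass2 ((pvGroupBy0 xs).foldl pvStepA ([], 1)).1
         ((pvGroupBy0 xs).foldl pvStepA ([], 1)).2))) := rfl
  have hB : flatten_address_alt xs =
      (if ((PySem.List.enumerate xs 0).foldl pvScanStep (0, 0, 0, 0)).2.2.2 = 8 then "::0"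
       else PySem.Str.join ":" (pvFixup
         (if 2 ≤ ((PySem.List.enumerate xs 0).foldl pvScanStep (0, 0, 0, 0)).2.2.2 then
            PySem.List.slice xs none
              (some ((PySem.List.enumerate xs 0).foldl pvScanStep (0, 0, 0, 0)).2.2.1) ++
              [""] ++
              PySem.List.slice xs
                (some (((PySem.List.enumerate xs 0).foldl pvScanStep (0, 0, 0, 0)).2.2.1 +
                  ((PySem.List.enumerate xs 0).foldl pvScanStep (0, 0, 0, 0)).2.2.2)) none
          else xs))) := rfl
  rw [hA, hB, hfold, hscan]
  dsimp only
  rw [hsnd]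
  by_cases h2 : 2 ≤ pvBestLen (pvGroupBy0 xs)
  · by_cases h8 : pvBestLen (pvGroupBy0 xs) = 8
    · rw [if_pos (by omega), if_pos (by exact_mod_cast h8)]
    · have hmax : max 1 (pvBestLen (pvGroupBy0 xs) : Int) = (pvBestLen (pvGroupBy0 xs) : Int) := by
        omega
      rw [hmax, if_neg (by exact_mod_cast h8), if_neg (by exact_mod_cast h8),
        if_pos (by exact_mod_cast h2)]
      have hfp := pvBestAux_fpos (pvBestLen (pvGroupBy0 xs)) (pvGroupBy0 xs)
        (pvBestLen_le (pvGroupBy0 xs)) (pvBestLen_exists (pvGroupBy0 xs) (by omega))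
        0 0 0 (by omega)
      rw [hfp]
      dsimp only
      simp only [zero_add]
      have hcol := pvRender_collapse (pvBestLen (pvGroupBy0 xs)) h2 (pvGroupBy0 xs) hwf
        (pvBestLen_le (pvGroupBy0 xs)) (pvBestLen_exists (pvGroupBy0 xs) (by omega))
      rw [pvPass2_build, hcol, hflat, PySem.List.slice_to_natCast]
      rw [show ((pvFpos (pvBestLen (pvGroupBy0 xs)) (pvGroupBy0 xs) : Int) +
            (pvBestLen (pvGroupBy0 xs) : Int)) =
          (((pvFpos (pvBestLen (pvGroupBy0 xs)) (pvGroupBy0 xs) +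
            pvBestLen (pvGroupBy0 xs) : Nat)) : Int) from by push_cast; ring,
        PySem.List.slice_from_natCast]
      simp
  · have hmax : max 1 (pvBestLen (pvGroupBy0 xs) : Int) = 1 := by omega
    rw [hmax, if_neg (by omega), if_neg (by omega), if_neg (by omega),
      pvPass2_build, pvRender_one (pvGroupBy0 xs) hwf (by omega), hflat]
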